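-- pv_equiv track=rewrite | github.com/MrSiuuu/IA_pythonGit | main.py | occurrence_table
-- ===== SOURCE A (Python) =====
-- def occurrence_table(words):
--     occurrence_dict = {}
--     for word in words:
--         for i in range(len(word) - 1):
--             current_letter = word[i]
--             next_letter = word[i + 1]
--             if current_letter not in occurrence_dict:
--                 occurrence_dict[current_letter] = {}
--             if next_letter not in occurrence_dict[current_letter]:
--                 occurrence_dict[current_letter][next_letter] = 1
--             else:
--                 occurrence_dict[current_letter][next_letter] += 1
--     return occurrence_dict
-- ===== SOURCE B (Python) =====
-- def _row(pairs, a):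
--     # all successors of `a` in order, then a dedup-and-count comprehension
--     seconds = [b for x, b in pairs if x == a]
--     return {b: seconds.count(b) for b in dict.fromkeys(seconds)}
--
-- def occurrence_table(words):
--     # Declarative re-implementation: materialize the flat list of adjacent pairs,
--     # then build each row by deduplicating keys (first-occurrence order) and
--     # counting with list.count — no incremental nested-dict mutation at all.
--     pairs = [p for w in words for p in zip(w, w[1:])]
--     return {a: _row(pairs, a) for a in dict.fromkeys(a for a, _ in pairs)}
-- ===== Notes on version B (the rewrite author's own statement) =====
-- stated objective: alternative
-- what changed: Replaces A's single stateful pass that mutates a nested dict with manual initialization by a declarative pipeline: materialize the flat list of adjacent pairs once, take the deduplicated first letters (dict.fromkeys) as outer keys, and build each row by filtering that letter's successors and counting each distinct successor with list.count - no dict accumulation at all.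
import Mathlib
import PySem

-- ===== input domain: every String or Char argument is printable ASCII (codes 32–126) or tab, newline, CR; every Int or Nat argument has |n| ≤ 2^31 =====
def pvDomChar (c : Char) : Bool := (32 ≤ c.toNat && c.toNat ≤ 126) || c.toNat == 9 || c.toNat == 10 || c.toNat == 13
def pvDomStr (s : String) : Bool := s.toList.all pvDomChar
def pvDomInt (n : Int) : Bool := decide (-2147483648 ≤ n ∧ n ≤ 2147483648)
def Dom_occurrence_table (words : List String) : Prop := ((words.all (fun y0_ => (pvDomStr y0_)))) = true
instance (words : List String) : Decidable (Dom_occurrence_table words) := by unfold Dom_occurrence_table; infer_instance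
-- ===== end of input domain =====

-- B replaces A's stateful nested-dict pass by a declarative pipeline: flatten all adjacent
-- pairs, dedup the first letters, and count each row's successors with list.count; not faster.

-- ===== PORT A =====
-- literal port of A's single nested loop (word[i]/word[i+1] are always in range there,
-- so the Option from pyGet? is discharged with getD — same value on every reachable index)
def occurrence_table (words : List String) : List (String × List (String × Int)) :=
  let d := words.foldl (fun d word =>
    (PySem.List.pyRange 0 (PySem.Str.len word - 1)).foldl (fun d i =>
      let cur : String := String.ofList [(PySem.Str.pyGet? word i).getD ' ']
      let nxt : String := String.ofList [(PySem.Str.pyGet? word (i + 1)).getD ' ']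
      let d := if d.contains cur then d else d.insert cur PySem.Dict.empty
      let inner := d.getD cur PySem.Dict.empty
      if inner.contains nxt = false then
        d.insert cur (inner.insert nxt 1)
      else
        d.insert cur (inner.insert nxt (inner.getD nxt 0 + 1))) d)
    (PySem.Dict.empty : PySem.Dict String (PySem.Dict String Int))
  d.items.map (fun kv => (kv.1, kv.2.items))

-- ===== PORT B =====
-- Source B's _row: that letter's successors in order, then a dedup-and-count comprehension
def pvRowB (pairs : List (String × String)) (a : String) : List (String × Int) :=
  let seconds := (pairs.filter (fun p => p.1 == a)).map Prod.snd
  (PySem.List.dedup seconds).map (fun b => (b, (seconds.count b : Int)))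

-- Source B's occurrence_table: flat pair list, then a row per deduplicated first letter
def occurrence_table_alt (words : List String) : List (String × List (String × Int)) :=
  let pairs := words.flatMap (fun w =>
    (w.toList.zip (PySem.Str.slice w (some 1) none).toList).map
      (fun p => (String.ofList [p.1], String.ofList [p.2])))
  (PySem.List.dedup (pairs.map Prod.fst)).map (fun a => (a, pvRowB pairs a))

-- ===== PRECONDITION & SPEC =====
def Spec_occurrence_table (words : List String) (out : List (String × List (String × Int))) : Prop := out = occurrence_table_alt words
instance (words : List String) (out : List (String × List (String × Int))) : Decidable (Spec_occurrence_table words out) := by unfold Spec_occurrence_table; infer_instance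

-- ===== CLAIM (what is proved, stated in full; the proofs are below) =====
def Claim_equal_occurrence_table : Prop := ∀ (words : List String), Dom_occurrence_table words → Spec_occurrence_table words (occurrence_table words)

-- ===== LEMMAS AND PROOFS =====

-- set result[a][b] = v (nested insert), and A's per-pair step: increment result[a][b]
def pvNestIns (r : PySem.Dict String (PySem.Dict String Int)) (a b : String) (v : Int) :
    PySem.Dict String (PySem.Dict String Int) :=
  r.insert a ((r.getD a PySem.Dict.empty).insert b v)

def pvCntStep (d : PySem.Dict String (PySem.Dict String Int)) (p : String × String) :
    PySem.Dict String (PySem.Dict String Int) :=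
  pvNestIns d p.1 p.2 ((d.getD p.1 PySem.Dict.empty).getD p.2 0 + 1)

-- the flat stream of adjacent letter pairs of one word
def pvPairs (w : String) : List (String × String) :=
  (w.toList.zip w.toList.tail).map (fun p => (String.ofList [p.1], String.ofList [p.2]))

-- the index loop over range(len(w)-1) with w[i], w[i+1] is the fold over adjacent pairs
theorem pv_range_zip {α : Type} (t : List Char) (x : Char) (g : α → Char → Char → α) (d : α) :
    (List.range t.length).foldl
        (fun d k => g d (((x :: t)[k]?).getD ' ') (((x :: t)[k + 1]?).getD ' ')) d
      = ((x :: t).zip t).foldl (fun d p => g d p.1 p.2) d := by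
  induction t generalizing x d with
  | nil => rfl
  | cons y t ih =>
    rw [List.length_cons, List.range_succ_eq_map, List.foldl_cons, List.foldl_map]
    simpa using ih y (g d x y)

theorem pv_word_loop {α : Type} (w : String) (g : α → Char → Char → α) (d : α) :
    (PySem.List.pyRange 0 ((w.toList.length : Int) - 1)).foldl
        (fun d i => g d ((PySem.List.pyGet? w.toList i).getD ' ')
          ((PySem.List.pyGet? w.toList (i + 1)).getD ' ')) d
      = (w.toList.zip w.toList.tail).foldl (fun d p => g d p.1 p.2) d := by
  rcases hw : w.toList with _ | ⟨x, t⟩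
  · rfl
  · have hlen : ((x :: t).length : Int) - 1 = (t.length : Int) := by
      push_cast [List.length_cons]; ring
    rw [hlen, PySem.List.pyRange_zero_natCast, List.foldl_map, List.tail_cons,
      ← pv_range_zip t x g d]
    apply PySem.List.foldl_congr_mem
    intro d k _
    have h1 : ((k : Int) + 1) = ((k + 1 : Nat) : Int) := by push_cast; ring
    rw [h1]
    simp [PySem.List.pyGet?_natCast]

-- A's literal loop body equals pvCntStep
theorem pv_stepA_norm (d : PySem.Dict String (PySem.Dict String Int)) (cur nxt : String) :
    (let d' := if d.contains cur then d else d.insert cur PySem.Dict.empty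
     let inner := d'.getD cur PySem.Dict.empty
     if inner.contains nxt = false then
       d'.insert cur (inner.insert nxt 1)
     else
       d'.insert cur (inner.insert nxt (inner.getD nxt 0 + 1)))
      = pvCntStep d (cur, nxt) := by
  by_cases hc : d.contains cur = true
  · simp only [hc, if_pos]
    by_cases hn : (d.getD cur PySem.Dict.empty).contains nxt = true
    · simp [hn, pvCntStep, pvNestIns]
    · have h0 : (d.getD cur PySem.Dict.empty).getD nxt 0 = 0 :=
        PySem.Dict.getD_of_not_contains _ _ (by simpa using hn)
      simp [hn, pvCntStep, pvNestIns, h0]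
  · have hd : d.getD cur PySem.Dict.empty = PySem.Dict.empty :=
      PySem.Dict.getD_of_not_contains _ _ (by simpa using hc)
    simp [hc, pvCntStep, pvNestIns, hd, PySem.Dict.getD_insert_self,
      PySem.Dict.contains_empty, PySem.Dict.insert_insert_self, PySem.Dict.getD_empty]

-- A's dict = fold of pvCntStep over the flat pair stream
theorem pv_A_flat (words : List String) :
    occurrence_table words
      = ((words.flatMap pvPairs).foldl pvCntStep PySem.Dict.empty).items.map
          (fun kv => (kv.1, kv.2.items)) := by
  rw [occurrence_table, List.foldl_flatMap]
  congr 2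
  apply PySem.List.foldl_congr_mem
  intro d w _
  have hlen : PySem.Str.len w - 1 = ((w.toList.length : Int) - 1) := by
    rw [PySem.Str.len_eq]
  simp only [hlen]
  have hbody : (fun (d : PySem.Dict String (PySem.Dict String Int)) (i : Int) =>
      let cur : String := String.ofList [(PySem.Str.pyGet? w i).getD ' ']
      let nxt : String := String.ofList [(PySem.Str.pyGet? w (i + 1)).getD ' ']
      let d' := if d.contains cur then d else d.insert cur PySem.Dict.empty
      let inner := d'.getD cur PySem.Dict.empty
      if inner.contains nxt = false then
        d'.insert cur (inner.insert nxt 1)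
      else
        d'.insert cur (inner.insert nxt (inner.getD nxt 0 + 1)))
      = (fun d i =>
        pvCntStep d (String.ofList [(PySem.List.pyGet? w.toList i).getD ' '],
          String.ofList [(PySem.List.pyGet? w.toList (i + 1)).getD ' '])) := by
    funext d i
    rw [← pv_stepA_norm]
    simp [PySem.Str.pyGet?]
  rw [hbody,
    pv_word_loop w (fun d c1 c2 => pvCntStep d (String.ofList [c1], String.ofList [c2])) d,
    pvPairs, List.foldl_map]

-- B's flat pair list is the same stream (w[1:] is the tail of the char list)
theorem pv_B_pairs (words : List String) :
    words.flatMap (fun w =>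
        (w.toList.zip (PySem.Str.slice w (some 1) none).toList).map
          (fun p => (String.ofList [p.1], String.ofList [p.2])))
      = words.flatMap pvPairs := by
  apply List.flatMap_congr
  intro w _
  have hsl : (PySem.Str.slice w (some 1) none).toList = w.toList.tail := by
    rw [PySem.Str.toList_slice, PySem.Chars.slice_eq_listSlice,
      PySem.List.slice_from _ (by norm_num)]
    simp [List.drop_one]
  rw [hsl]; rfl

-- inner-dict extraction: the row of `a` in A's fold is the counting fold over
-- the successors of `a` in the flat stream
theorem pv_getD_fold (qs : List (String × String)) (d : PySem.Dict String (PySem.Dict String Int))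
    (a : String) :
    (qs.foldl pvCntStep d).getD a PySem.Dict.empty
      = ((qs.filter (fun p => p.1 == a)).map Prod.snd).foldl
          (fun g b => g.insert b (g.getD b 0 + 1)) (d.getD a PySem.Dict.empty) := by
  induction qs generalizing d with
  | nil => rfl
  | cons q qs ih =>
    rw [List.foldl_cons, ih]
    by_cases hq : q.1 = a
    · subst hq
      simp [pvCntStep, pvNestIns, PySem.Dict.getD_insert_self]
    · have hne : a ≠ q.1 := fun h => hq h.symm
      have hb : (q.1 == a) = false := beq_eq_false_iff_ne.2 hq
      simp only [pvCntStep, pvNestIns, List.filter_cons, hb, Bool.false_eq_true, if_false]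
      rw [PySem.Dict.getD_insert_of_ne _ _ _ hne]

-- keys of A's fold: first occurrences of the first letters, in order
theorem pv_keys_fold (qs : List (String × String)) :
    (qs.foldl pvCntStep PySem.Dict.empty).keys = PySem.Set.ofList (qs.map Prod.fst) := by
  have h := PySem.Dict.keys_foldl_insert_key qs Prod.fst
    (fun (d : PySem.Dict String (PySem.Dict String Int)) p =>
      (d.getD p.1 PySem.Dict.empty).insert p.2 ((d.getD p.1 PySem.Dict.empty).getD p.2 0 + 1))
    PySem.Dict.empty
  simpa [pvCntStep, pvNestIns, PySem.Dict.keys_empty, PySem.Set.update,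
    PySem.Set.ofList_eq_foldl] using h

theorem pv_nodup_keys_fold (qs : List (String × String)) :
    (qs.foldl pvCntStep PySem.Dict.empty).keys.Nodup := by
  have h := PySem.Dict.nodup_keys_foldl_insert_key qs Prod.fst
    (fun (d : PySem.Dict String (PySem.Dict String Int)) p =>
      (d.getD p.1 PySem.Dict.empty).insert p.2 ((d.getD p.1 PySem.Dict.empty).getD p.2 0 + 1))
    PySem.Dict.empty PySem.Dict.nodup_keys_empty
  simpa [pvCntStep, pvNestIns] using h

-- ===== VERDICT (by name: the statement is the Claim_ definition above) =====
theorem occurrence_table_spec : Claim_equal_occurrence_table := by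
  intro words _
  show occurrence_table words = occurrence_table_alt words
  rw [pv_A_flat, occurrence_table_alt, pv_B_pairs]
  set qs := words.flatMap pvPairs with hqs
  rw [PySem.Dict.items_eq_map_keys _ (pv_nodup_keys_fold qs) PySem.Dict.empty,
    List.map_map, pv_keys_fold]
  simp only [PySem.List.dedup_eq_ofList]
  apply List.map_congr_left
  intro a _
  simp only [Function.comp_apply]
  congr 1
  rw [pv_getD_fold qs PySem.Dict.empty a]
  simp only [PySem.Dict.getD_empty]
  rw [PySem.Dict.foldl_insert_getD_add_one_eq_counter, PySem.Dict.items_counter]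
  simp [pvRowB]
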